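-- pv_equiv track=rewrite | github.com/Yash1321/mlexp-1 | Collaborative.py | items_common
-- ===== SOURCE A (Python) =====
-- def items_common(user1_data, user2_data):
--     result = []
--     ht = {}
--     for (movie, rating) in user1_data.items():
--         ht.setdefault(movie, 0)
--         ht[movie] += 1
--     for (movie, rating) in user2_data.items():
--         ht.setdefault(movie, 0)
--         ht[movie] += 1
--     for (k, v) in ht.items():
--         if v == 2:
--             result.append(k)
--     return result
-- ===== SOURCE B (Python) =====
-- def items_common(user1_data, user2_data):
--     return [movie for movie in user1_data if movie in user2_data]
-- ===== Notes on version B (the rewrite author's own statement) =====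
-- stated objective: simpler
-- what changed: Drops the histogram dict and its three loops entirely: B is a single comprehension over user1_data's keys keeping those that are keys of user2_data, which preserves A's output order.
import Mathlib
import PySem

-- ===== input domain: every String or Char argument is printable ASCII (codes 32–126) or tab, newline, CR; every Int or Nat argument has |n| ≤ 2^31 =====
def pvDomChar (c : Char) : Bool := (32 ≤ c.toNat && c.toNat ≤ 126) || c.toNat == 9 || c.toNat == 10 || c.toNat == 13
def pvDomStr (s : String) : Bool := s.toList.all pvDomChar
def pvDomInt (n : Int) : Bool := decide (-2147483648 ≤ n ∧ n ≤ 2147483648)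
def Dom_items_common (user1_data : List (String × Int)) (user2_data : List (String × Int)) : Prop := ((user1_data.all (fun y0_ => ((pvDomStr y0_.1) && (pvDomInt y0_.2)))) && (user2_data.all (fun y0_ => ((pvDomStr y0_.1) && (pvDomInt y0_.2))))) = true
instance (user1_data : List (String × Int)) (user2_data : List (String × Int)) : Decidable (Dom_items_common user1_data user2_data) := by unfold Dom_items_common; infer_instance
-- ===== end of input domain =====

-- B replaces A's histogram dict and three loops with one filter over user1's keys by membership in user2's keys (same output, same order).


-- ===== PORT A =====
-- ht.setdefault(movie, 0); ht[movie] += 1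
def pvStepA (ht : PySem.Dict String Int) (p : String × Int) : PySem.Dict String Int :=
  let ht1 := ht.setdefault p.1 0
  ht1.insert p.1 (ht1.getD p.1 0 + 1)

def items_common (user1_data : List (String × Int)) (user2_data : List (String × Int)) : List String :=
  let result : List String := []
  let ht : PySem.Dict String Int := PySem.Dict.empty
  let ht := user1_data.foldl pvStepA ht
  let ht := user2_data.foldl pvStepA ht
  ht.items.foldl (fun result kv => if kv.2 == 2 then result ++ [kv.1] else result) result

-- ===== PORT B =====
-- [movie for movie in user1_data if movie in user2_data]
def items_common_alt (user1_data : List (String × Int)) (user2_data : List (String × Int)) : List String :=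
  (user1_data.map Prod.fst).filter (fun movie => (user2_data.map Prod.fst).contains movie)

-- ===== PRECONDITION & SPEC =====
-- Python dict arguments always have distinct keys; Pre_ only excludes association lists with
-- duplicate keys, which do not encode any Python dict input.
def Pre_items_common (user1_data : List (String × Int)) (user2_data : List (String × Int)) : Prop :=
  (user1_data.map Prod.fst).Nodup ∧ (user2_data.map Prod.fst).Nodup
instance (user1_data : List (String × Int)) (user2_data : List (String × Int)) : Decidable (Pre_items_common user1_data user2_data) := by unfold Pre_items_common; infer_instance

def pvWitness_items_common : (List (String × Int)) × (List (String × Int)) :=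
  ([("a", 1), ("b", 2)], [("b", 5), ("c", 3)])

def Spec_items_common (user1_data : List (String × Int)) (user2_data : List (String × Int)) (out : List String) : Prop := out = items_common_alt user1_data user2_data
instance (user1_data : List (String × Int)) (user2_data : List (String × Int)) (out : List String) : Decidable (Spec_items_common user1_data user2_data out) := by unfold Spec_items_common; infer_instance

-- ===== CLAIM (what is proved, stated in full; the proofs are below) =====
def Claim_equal_items_common : Prop := ∀ (user1_data : List (String × Int)) (user2_data : List (String × Int)), Dom_items_common user1_data user2_data → Pre_items_common user1_data user2_data → Spec_items_common user1_data user2_data (items_common user1_data user2_data)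

-- ===== LEMMAS AND PROOFS =====

-- A's loop body is the counting insert.
theorem pvStepA_eq (ht : PySem.Dict String Int) (p : String × Int) :
    pvStepA ht p = ht.insert p.1 (ht.getD p.1 0 + 1) := by
  unfold pvStepA
  by_cases h : ht.contains p.1 = true
  · rw [PySem.Dict.setdefault_of_contains _ _ h]
  · have h' : ht.contains p.1 = false := by simpa using h
    rw [PySem.Dict.setdefault_of_not_contains _ _ h']
    simp only [PySem.Dict.getD_insert_self, PySem.Dict.insert_insert_self,
      PySem.Dict.getD_of_not_contains _ _ h']

theorem items_common_eq_filter (u1 u2 : List (String × Int)) :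
    items_common u1 u2 =
      ((PySem.Set.ofList (u1.map Prod.fst ++ u2.map Prod.fst)).filter
        (fun k => ((((u1.map Prod.fst ++ u2.map Prod.fst).count k : Int)) == 2))) := by
  unfold items_common
  have hfun : pvStepA = fun d (p : String × Int) => d.insert p.1 (d.getD p.1 0 + 1) :=
    funext fun d => funext fun p => pvStepA_eq d p
  simp only [hfun]
  have hm : ∀ (l : List (String × Int)) (d : PySem.Dict String Int),
      l.foldl (fun d p => d.insert p.1 (d.getD p.1 0 + 1)) d
        = (l.map Prod.fst).foldl (fun d x => d.insert x (d.getD x 0 + 1)) d :=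
    by intro l d; rw [List.foldl_map]
  rw [hm, hm, ← List.foldl_append,
      PySem.Dict.foldl_insert_getD_add_one_eq_counter,
      PySem.Dict.items_counter,
      PySem.List.foldl_append_if (fun kv => kv.2 == 2) Prod.fst]
  simp [List.filter_map, Function.comp_def]

theorem items_common_spec_aux (u1 u2 : List (String × Int))
    (h1 : (u1.map Prod.fst).Nodup) (h2 : (u2.map Prod.fst).Nodup) :
    items_common u1 u2 = items_common_alt u1 u2 := by
  rw [items_common_eq_filter]
  set K1 := u1.map Prod.fst with hK1
  set K2 := u2.map Prod.fst with hK2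
  have hof : PySem.Set.ofList (K1 ++ K2) = K1 ++ K2.filter (fun y => !(PySem.Set.contains K1 y)) := by
    rw [PySem.Set.ofList_append, PySem.Set.ofList_eq_self_of_nodup K1 h1,
        PySem.Set.update_eq_append_filter, PySem.Set.ofList_eq_self_of_nodup K2 h2]
  rw [hof, List.filter_append]
  have hdrop : (K2.filter (fun y => !(PySem.Set.contains K1 y))).filter
      (fun k => (((K1 ++ K2).count k : Int) == 2)) = [] := by
    rw [List.filter_eq_nil_iff]
    intro k hk
    have hk' := List.mem_filter.mp hk
    have hnot1 : k ∉ K1 := by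
      have := hk'.2
      simp only [PySem.Set.contains_eq_listContains, List.contains_eq_mem,
        Bool.not_eq_true', decide_eq_false_iff_not] at this
      exact this
    have hc1 : K1.count k = 0 := List.count_eq_zero.mpr hnot1
    have hc2 : K2.count k ≤ 1 := List.nodup_iff_count_le_one.mp h2 k
    simp only [beq_iff_eq, List.count_append, hc1]
    intro hbad
    omega
  rw [hdrop, List.append_nil]
  unfold items_common_alt
  rw [← hK1, ← hK2]
  apply List.filter_congr
  intro k hk
  have hc1 : K1.count k = 1 := List.count_eq_one_of_mem h1 hk
  rw [List.count_append, hc1]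
  by_cases hm : k ∈ K2
  · have hc : K2.count k = 1 := List.count_eq_one_of_mem h2 hm
    simp [hc, List.contains_eq_mem, hm]
  · have hc : K2.count k = 0 := List.count_eq_zero.mpr hm
    simp [hc, List.contains_eq_mem, hm]

-- ===== VERDICT (by name: the statement is the Claim_ definition above) =====
theorem items_common_spec : Claim_equal_items_common := by
  intro u1 u2 _hdom hpre
  unfold Spec_items_common
  exact items_common_spec_aux u1 u2 hpre.1 hpre.2
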